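-- pv_equiv track=rewrite | github.com/Tareqhasanmunna/Artificial-Intelligence | modify bfs.py | bfs
-- ===== SOURCE A (Python) =====
-- from collections import deque
--
-- def bfs(graph, start, obstacles):
--     visited = set()
--     queue = deque([start])
--     visited.add(start)
--
--     while queue:
--         node = queue.popleft()
--         for neighbor in graph[node]:
--             if neighbor not in visited and neighbor not in obstacles:
--                 visited.add(neighbor)
--                 queue.append(neighbor)
--
--     return visited
-- ===== SOURCE B (Python) =====
-- def bfs(graph, start, obstacles):
--     # Level-synchronous reachability: process whole frontiers with plain lists,
--     # no deque.  Same visited set as the queue-based version.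
--     visited = {start}
--     frontier = [start]
--     while frontier:
--         next_frontier = []
--         for node in frontier:
--             for neighbor in graph[node]:
--                 if neighbor not in visited and neighbor not in obstacles:
--                     visited.add(neighbor)
--                     next_frontier.append(neighbor)
--         frontier = next_frontier
--     return visited
-- ===== Notes on version B (the rewrite author's own statement) =====
-- stated objective: alternative
-- what changed: Replaced the deque-based node-at-a-time BFS with a level-synchronous traversal that expands whole frontier lists (no queue data structure), discovering the same reachable set in the same order.
import Mathlib
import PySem

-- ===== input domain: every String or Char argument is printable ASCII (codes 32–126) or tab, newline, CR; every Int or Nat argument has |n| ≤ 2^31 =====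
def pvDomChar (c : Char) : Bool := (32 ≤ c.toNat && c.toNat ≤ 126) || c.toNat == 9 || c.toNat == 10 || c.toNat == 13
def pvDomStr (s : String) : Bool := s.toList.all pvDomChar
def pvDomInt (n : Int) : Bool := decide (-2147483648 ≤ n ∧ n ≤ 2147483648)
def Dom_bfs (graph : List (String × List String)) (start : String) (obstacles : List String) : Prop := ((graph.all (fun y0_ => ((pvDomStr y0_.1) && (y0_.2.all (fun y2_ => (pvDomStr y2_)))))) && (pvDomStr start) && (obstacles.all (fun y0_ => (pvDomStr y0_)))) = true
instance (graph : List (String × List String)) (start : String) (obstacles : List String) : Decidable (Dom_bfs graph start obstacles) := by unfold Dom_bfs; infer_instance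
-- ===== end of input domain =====

-- B replaces A's deque-based one-node-at-a-time BFS by a level-synchronous frontier
-- traversal (objective: alternative, same reachable set); equivalence is about the
-- returned set (neither version mutates its arguments observably).

-- ===== PORT A =====
-- the inner `for neighbor in graph[node]:` body, shared verbatim by both Pythons
def visitStep (obstacles : List String) (st : PySem.Set String × List String) (neighbor : String) : PySem.Set String × List String :=
  if !(PySem.Set.contains st.1 neighbor) && !(obstacles.contains neighbor) then
    (PySem.Set.add st.1 neighbor, st.2 ++ [neighbor])
  else st

-- A's `while queue:` loop; fuel only makes the recursion total (graph.length + 1 pops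
-- always suffice under Pre_).  `graph[node]` is `getD … []`, exact under Pre_.
def bfsLoopA (g : PySem.Dict String (List String)) (obstacles : List String) : Nat → PySem.Set String → List String → PySem.Set String
  | 0, visited, _ => visited
  | _ + 1, visited, [] => visited
  | fuel + 1, visited, node :: queue =>
      let st := (PySem.Dict.getD g node []).foldl (visitStep obstacles) (visited, queue)
      bfsLoopA g obstacles fuel st.1 st.2

def bfs (graph : List (String × List String)) (start : String) (obstacles : List String) : List String :=
  let g := PySem.Dict.ofList graph
  let visited := PySem.Set.add PySem.Set.empty start
  bfsLoopA g obstacles (graph.length + 1) visited [start]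

-- ===== PORT B =====
-- `for node in frontier: for neighbor in graph[node]: …` — one whole level
def bfsLevel (g : PySem.Dict String (List String)) (obstacles : List String) (st : PySem.Set String × List String) (frontier : List String) : PySem.Set String × List String :=
  frontier.foldl (fun st node => (PySem.Dict.getD g node []).foldl (visitStep obstacles) st) st

-- B's `while frontier:` loop (fuel again only for totality)
def bfsLoopB (g : PySem.Dict String (List String)) (obstacles : List String) : Nat → PySem.Set String → List String → PySem.Set String
  | 0, visited, _ => visited
  | _ + 1, visited, [] => visited
  | fuel + 1, visited, node :: frontier =>
      let r := bfsLevel g obstacles (visited, []) (node :: frontier)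
      bfsLoopB g obstacles fuel r.1 r.2

def bfs_alt (graph : List (String × List String)) (start : String) (obstacles : List String) : List String :=
  let g := PySem.Dict.ofList graph
  bfsLoopB g obstacles (graph.length + 2) (PySem.Set.add PySem.Set.empty start) [start]

-- ===== PRECONDITION & SPEC =====
-- the mathematical reachable set of the input graph: one monotone neighbor-expansion
-- step (skipping obstacles), iterated to its fixpoint — (total number of listed
-- neighbors) + 1 iterations always reach it (proved below: reachSet_fixpoint)
def reachExpand (obstacles : List String) (acc : List String) (ns : List String) : List String :=
  ns.foldl (fun a n => if a.contains n || obstacles.contains n then a else a ++ [n]) acc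

def reachStep (g : PySem.Dict String (List String)) (obstacles : List String) (S : List String) : List String :=
  S.foldl (fun a k => reachExpand obstacles a (PySem.Dict.getD g k [])) S

def reachSet (graph : List (String × List String)) (start : String) (obstacles : List String) : List String :=
  (reachStep (PySem.Dict.ofList graph) obstacles)^[(graph.map (fun p => p.2.length)).sum + 1] [start]

-- Pre_ excludes EXACTLY the inputs on which A raises KeyError — those where some node
-- reachable from start (avoiding obstacles) is not a key of graph; B raises there too.
def Pre_bfs (graph : List (String × List String)) (start : String) (obstacles : List String) : Prop :=
  ∀ x ∈ reachSet graph start obstacles, (PySem.Dict.ofList graph).contains x = true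
instance (graph : List (String × List String)) (start : String) (obstacles : List String) : Decidable (Pre_bfs graph start obstacles) := by unfold Pre_bfs; infer_instance

def pvWitness_bfs : (List (String × List String)) × String × List String :=
  ([("a", ["b", "c"]), ("b", []), ("c", ["a"])], "a", ["c"])

def Spec_bfs (graph : List (String × List String)) (start : String) (obstacles : List String) (out : List String) : Prop := out = bfs_alt graph start obstacles
instance (graph : List (String × List String)) (start : String) (obstacles : List String) (out : List String) : Decidable (Spec_bfs graph start obstacles out) := by unfold Spec_bfs; infer_instance

-- ===== CLAIM (what is proved, stated in full; the proofs are below) =====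
def Claim_equal_bfs : Prop := ∀ (graph : List (String × List String)) (start : String) (obstacles : List String), Dom_bfs graph start obstacles → Pre_bfs graph start obstacles → Spec_bfs graph start obstacles (bfs graph start obstacles)

-- ===== LEMMAS AND PROOFS =====

-- ---------- the reachable-set closure: basic facts ----------

theorem reachExpand_cons (obstacles : List String) (acc : List String) (n : String) (rest : List String) :
    reachExpand obstacles acc (n :: rest)
      = if acc.contains n || obstacles.contains n then reachExpand obstacles acc rest
        else reachExpand obstacles (acc ++ [n]) rest := by
  simp only [reachExpand, List.foldl_cons]
  by_cases h : (acc.contains n || obstacles.contains n) = true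
  · rw [if_pos h, if_pos h]
  · rw [if_neg h, if_neg h]

theorem prefix_reachExpand (obstacles : List String) (ns acc : List String) :
    acc <+: reachExpand obstacles acc ns := by
  induction ns generalizing acc with
  | nil => exact List.prefix_rfl
  | cons n rest ih =>
    rw [reachExpand_cons]
    by_cases h : (acc.contains n || obstacles.contains n) = true
    · rw [if_pos h]; exact ih acc
    · rw [if_neg h]
      exact (List.prefix_append acc [n]).trans (ih (acc ++ [n]))

theorem prefix_foldl_expand (g : PySem.Dict String (List String)) (obstacles : List String)
    (l acc : List String) :
    acc <+: l.foldl (fun a k => reachExpand obstacles a (PySem.Dict.getD g k [])) acc := by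
  induction l generalizing acc with
  | nil => exact List.prefix_rfl
  | cons k rest ih =>
    exact (prefix_reachExpand obstacles _ acc).trans (ih _)

theorem prefix_reachStep (g : PySem.Dict String (List String)) (obstacles : List String) (S : List String) :
    S <+: reachStep g obstacles S := prefix_foldl_expand g obstacles S S

theorem mem_reachExpand_of_mem (obstacles : List String) (ns acc : List String) (x : String)
    (hx : x ∈ ns) (hobs : obstacles.contains x = false) : x ∈ reachExpand obstacles acc ns := by
  induction ns generalizing acc with
  | nil => cases hx
  | cons n rest ih =>
    rw [reachExpand_cons]
    rcases List.mem_cons.1 hx with rfl | hx'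
    · by_cases h : (acc.contains x || obstacles.contains x) = true
      · have hx_acc : x ∈ acc := by
          rcases Bool.or_eq_true_iff.1 h with h' | h'
          · exact List.contains_iff_mem.1 h'
          · rw [hobs] at h'; cases h'
        rw [if_pos h]
        exact (prefix_reachExpand obstacles rest acc).subset hx_acc
      · rw [if_neg h]
        exact (prefix_reachExpand obstacles rest (acc ++ [x])).subset (by simp)
    · by_cases h : (acc.contains n || obstacles.contains n) = true
      · rw [if_pos h]; exact ih acc hx'
      · rw [if_neg h]; exact ih _ hx'

theorem mem_reachStep (g : PySem.Dict String (List String)) (obstacles : List String)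
    (S : List String) (k x : String) (hk : k ∈ S) (hx : x ∈ PySem.Dict.getD g k [])
    (hobs : obstacles.contains x = false) : x ∈ reachStep g obstacles S := by
  unfold reachStep
  -- generalize over the folded list and the accumulator
  suffices h : ∀ (l acc : List String), k ∈ l →
      x ∈ l.foldl (fun a k => reachExpand obstacles a (PySem.Dict.getD g k [])) acc from
    h S S hk
  intro l
  induction l with
  | nil => intro acc h; cases h
  | cons k' rest ih =>
    intro acc hkl
    rcases List.mem_cons.1 hkl with rfl | hkl'
    · exact (prefix_foldl_expand g obstacles rest _).subset
        (mem_reachExpand_of_mem obstacles _ acc x hx hobs)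
    · exact ih _ hkl'

theorem mem_reachExpand_cases (obstacles : List String) (ns acc : List String) (y : String)
    (hy : y ∈ reachExpand obstacles acc ns) : y ∈ acc ∨ y ∈ ns := by
  induction ns generalizing acc with
  | nil => exact .inl hy
  | cons n rest ih =>
    rw [reachExpand_cons] at hy
    by_cases h : (acc.contains n || obstacles.contains n) = true
    · rw [if_pos h] at hy
      rcases ih acc hy with h' | h'
      · exact .inl h'
      · exact .inr (by simp [h'])
    · rw [if_neg h] at hy
      rcases ih (acc ++ [n]) hy with h' | h'
      · rcases List.mem_append.1 h' with h'' | h''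
        · exact .inl h''
        · exact .inr (by simp at h''; simp [h''])
      · exact .inr (by simp [h'])

theorem mem_reachStep_cases (g : PySem.Dict String (List String)) (obstacles : List String)
    (S : List String) (y : String) (hy : y ∈ reachStep g obstacles S) :
    y ∈ S ∨ ∃ k, y ∈ PySem.Dict.getD g k [] := by
  unfold reachStep at hy
  suffices h : ∀ (l acc : List String),
      y ∈ l.foldl (fun a k => reachExpand obstacles a (PySem.Dict.getD g k [])) acc →
      y ∈ acc ∨ ∃ k, y ∈ PySem.Dict.getD g k [] from h S S hy
  intro l
  induction l with
  | nil => intro acc h; exact .inl h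
  | cons k' rest ih =>
    intro acc h
    rcases ih _ h with h' | h'
    · rcases mem_reachExpand_cases obstacles _ acc y h' with h'' | h''
      · exact .inl h''
      · exact .inr ⟨k', h''⟩
    · exact .inr h'

theorem nodup_reachExpand (obstacles : List String) (ns acc : List String)
    (hnd : acc.Nodup) : (reachExpand obstacles acc ns).Nodup := by
  induction ns generalizing acc with
  | nil => exact hnd
  | cons n rest ih =>
    rw [reachExpand_cons]
    by_cases h : (acc.contains n || obstacles.contains n) = true
    · rw [if_pos h]; exact ih acc hnd
    · rw [if_neg h]
      refine ih _ ?_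
      have hnn : n ∉ acc := by
        intro hm
        exact absurd (Bool.or_eq_true_iff.2 (.inl (List.contains_iff_mem.2 hm))) h
      rw [List.nodup_append]
      exact ⟨hnd, List.nodup_singleton n, by
        intro a ha b hb hab
        rw [List.mem_singleton] at hb
        exact hnn ((hab ▸ hb : a = n) ▸ ha)⟩

theorem nodup_reachStep (g : PySem.Dict String (List String)) (obstacles : List String)
    (S : List String) (hnd : S.Nodup) : (reachStep g obstacles S).Nodup := by
  unfold reachStep
  suffices h : ∀ (l acc : List String), acc.Nodup →
      (l.foldl (fun a k => reachExpand obstacles a (PySem.Dict.getD g k [])) acc).Nodup from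
    h S S hnd
  intro l
  induction l with
  | nil => intro acc h; exact h
  | cons k' rest ih => intro acc h; exact ih _ (nodup_reachExpand obstacles _ acc h)

theorem reachStep_len_lt (g : PySem.Dict String (List String)) (obstacles : List String)
    (S : List String) (hne : reachStep g obstacles S ≠ S) :
    S.length < (reachStep g obstacles S).length := by
  obtain ⟨t, ht⟩ := prefix_reachStep g obstacles S
  rcases t with _ | ⟨a, t'⟩
  · exact absurd (by simpa using ht.symm) hne
  · rw [← ht]; simp

-- values looked up in the dict built from graph come from graph's adjacency lists
theorem mem_items_ofList {l : List (String × List String)} {p : String × List String}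
    (hp : p ∈ (PySem.Dict.ofList l).items) : p ∈ l := by
  induction l using List.reverseRecOn with
  | nil => simp [PySem.Dict.ofList, PySem.Dict.update, PySem.Dict.empty] at hp
  | append_singleton init q ih =>
    have : PySem.Dict.ofList (init ++ [q]) = (PySem.Dict.ofList init).insert q.1 q.2 := by
      simp [PySem.Dict.ofList, PySem.Dict.update, List.foldl_append]
    rw [this] at hp
    rcases ((PySem.Dict.mem_items_insert _ _ _ _).1 hp) with h | ⟨h, _⟩
    · simp [h]
    · exact List.mem_append.2 (.inl (ih h))

theorem getD_ofList_mem {graph : List (String × List String)} {k x : String}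
    (hx : x ∈ PySem.Dict.getD (PySem.Dict.ofList graph) k []) :
    x ∈ graph.flatMap (·.2) := by
  rcases hget : PySem.Dict.get? (PySem.Dict.ofList graph) k with _ | ns
  · rw [PySem.Dict.getD_eq_get?_getD, hget] at hx; cases hx
  · rw [PySem.Dict.getD_eq_get?_getD, hget] at hx
    simp only [Option.getD_some] at hx
    have hmem := PySem.Dict.mem_items_of_get?_eq_some (d := PySem.Dict.ofList graph) hget
    exact List.mem_flatMap.2 ⟨(k, ns), mem_items_ofList hmem, hx⟩

-- every iterate of the closure step is nodup and lives in {start} ∪ all listed neighbors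
theorem reach_iterate_bound (graph : List (String × List String)) (start : String)
    (obstacles : List String) (n : Nat) :
    ((reachStep (PySem.Dict.ofList graph) obstacles)^[n] [start]).Nodup ∧
    ∀ y ∈ (reachStep (PySem.Dict.ofList graph) obstacles)^[n] [start],
      y ∈ start :: graph.flatMap (·.2) := by
  induction n with
  | zero => simp
  | succ m ih =>
    rw [Function.iterate_succ_apply']
    obtain ⟨ih1, ih2⟩ := ih
    refine ⟨nodup_reachStep _ _ _ ih1, ?_⟩
    intro y hy
    rcases mem_reachStep_cases _ _ _ y hy with h | ⟨k, h⟩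
    · exact ih2 y h
    · exact List.mem_cons.2 (.inr (getD_ofList_mem h))

theorem reach_iterate_len_le (graph : List (String × List String)) (start : String)
    (obstacles : List String) (n : Nat) :
    ((reachStep (PySem.Dict.ofList graph) obstacles)^[n] [start]).length
      ≤ (graph.map (fun p => p.2.length)).sum + 1 := by
  classical
  obtain ⟨h1, h2⟩ := reach_iterate_bound graph start obstacles n
  set S := (reachStep (PySem.Dict.ofList graph) obstacles)^[n] [start] with hS
  have hsub : S.toFinset ⊆ (start :: graph.flatMap (·.2)).toFinset := by
    intro y hy
    rw [List.mem_toFinset] at hy ⊢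
    exact h2 y hy
  calc S.length = S.toFinset.card := (List.toFinset_card_of_nodup h1).symm
    _ ≤ (start :: graph.flatMap (·.2)).toFinset.card := Finset.card_le_card hsub
    _ ≤ (start :: graph.flatMap (·.2)).length := List.toFinset_card_le _
    _ = (graph.flatMap (·.2)).length + 1 := by simp
    _ = (graph.map (fun p => p.2.length)).sum + 1 := by rw [List.length_flatMap]

-- the iterate in reachSet really is a fixpoint of reachStep
theorem reachSet_fixpoint (graph : List (String × List String)) (start : String)
    (obstacles : List String) :
    reachStep (PySem.Dict.ofList graph) obstacles (reachSet graph start obstacles)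
      = reachSet graph start obstacles := by
  classical
  unfold reachSet
  set f := reachStep (PySem.Dict.ofList graph) obstacles with hf
  set F := (graph.map (fun p => p.2.length)).sum + 1 with hFdef
  by_cases hex : ∃ i < F, f (f^[i] [start]) = f^[i] [start]
  · obtain ⟨i, hiF, hfix⟩ := hex
    have hiter : f^[F] [start] = f^[i] [start] := by
      have : f^[F] [start] = f^[F - i] (f^[i] [start]) := by
        rw [← Function.iterate_add_apply]
        congr 1
        omega
      rw [this, Function.iterate_fixed hfix]
    show f (f^[F] [start]) = f^[F] [start]
    rw [hiter, hfix]
  · exfalso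
    push_neg at hex
    have hgrow : ∀ n ≤ F, n + 1 ≤ (f^[n] [start]).length := by
      intro n hn
      induction n with
      | zero => simp
      | succ m ihm =>
        have hm := ihm (by omega)
        have hne : f (f^[m] [start]) ≠ f^[m] [start] := hex m (by omega)
        have hlt := reachStep_len_lt (PySem.Dict.ofList graph) obstacles (f^[m] [start]) hne
        rw [← hf] at hlt
        rw [Function.iterate_succ_apply']
        omega
    have h1 := hgrow F le_rfl
    have h2 := reach_iterate_len_le graph start obstacles F
    rw [← hf] at h2
    omega

theorem start_mem_reachSet (graph : List (String × List String)) (start : String)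
    (obstacles : List String) : start ∈ reachSet graph start obstacles := by
  unfold reachSet
  set f := reachStep (PySem.Dict.ofList graph) obstacles with hf
  suffices h : ∀ n, [start] <+: f^[n] [start] from (h _).subset (by simp)
  intro n
  induction n with
  | zero => exact List.prefix_rfl
  | succ m ih =>
    rw [Function.iterate_succ_apply']
    exact ih.trans (prefix_reachStep _ _ _)

theorem reachSet_closed (graph : List (String × List String)) (start : String)
    (obstacles : List String) (k x : String) (hk : k ∈ reachSet graph start obstacles)
    (hx : x ∈ PySem.Dict.getD (PySem.Dict.ofList graph) k [])
    (hobs : obstacles.contains x = false) : x ∈ reachSet graph start obstacles := by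
  rw [← reachSet_fixpoint graph start obstacles]
  exact mem_reachStep _ _ _ k x hk hx hobs

-- ---------- the two loops ----------

-- accumulator lemma for the inner neighbor fold
theorem foldl_visitStep_acc (obstacles : List String) (ns : List String) (st : PySem.Set String × List String) :
    ns.foldl (visitStep obstacles) st
      = ((ns.foldl (visitStep obstacles) (st.1, [])).1, st.2 ++ (ns.foldl (visitStep obstacles) (st.1, [])).2) := by
  induction ns generalizing st with
  | nil => simp
  | cons n rest ih =>
    simp only [List.foldl_cons, visitStep, List.nil_append]
    by_cases h : (!(PySem.Set.contains st.1 n) && !(obstacles.contains n)) = true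
    · simp only [h, if_pos]
      rw [ih (PySem.Set.add st.1 n, st.2 ++ [n]), ih (PySem.Set.add st.1 n, [n])]
      simp
    · simp only [if_neg h]
      exact ih st

-- what one node's neighbor scan produces
theorem foldl_visitStep_props (obstacles : List String) (ns : List String) (v : PySem.Set String) :
    (ns.foldl (visitStep obstacles) (v, [])).1 = v ++ (ns.foldl (visitStep obstacles) (v, [])).2 ∧
    (ns.foldl (visitStep obstacles) (v, [])).2.Nodup ∧
    ∀ x ∈ (ns.foldl (visitStep obstacles) (v, [])).2, x ∉ v ∧ obstacles.contains x = false ∧ x ∈ ns := by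
  induction ns generalizing v with
  | nil => simp
  | cons n rest ih =>
    simp only [List.foldl_cons, visitStep]
    by_cases h : (!(PySem.Set.contains v n) && !(obstacles.contains n)) = true
    · have hnv : n ∉ v := by
        have := h; rw [Bool.and_eq_true, Bool.not_eq_true'] at this
        intro hm; rw [(PySem.Set.contains_iff v n).2 hm] at this; simp at this
      have hno : obstacles.contains n = false := by
        have := h; rw [Bool.and_eq_true, Bool.not_eq_true', Bool.not_eq_true'] at this; exact this.2
      simp only [h, if_pos, PySem.Set.add_of_not_mem hnv, List.nil_append]
      rw [foldl_visitStep_acc obstacles rest (v ++ [n], [n])]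
      dsimp only
      obtain ⟨ih1, ih2, ih3⟩ := ih (v ++ [n])
      refine ⟨?_, ?_, ?_⟩
      · rw [ih1]; simp
      · simp only [List.singleton_append, List.nodup_cons]
        constructor
        · intro hmem; exact ((ih3 n hmem).1) (by simp)
        · exact ih2
      · intro x hx
        simp only [List.singleton_append, List.mem_cons] at hx
        rcases hx with rfl | hx
        · exact ⟨hnv, hno, by simp⟩
        · obtain ⟨h1, h2, h3⟩ := ih3 x hx
          exact ⟨fun hm => h1 (by simp [hm]), h2, by simp [h3]⟩
    · simp only [if_neg h]
      obtain ⟨ih1, ih2, ih3⟩ := ih v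
      exact ⟨ih1, ih2, fun x hx => ⟨(ih3 x hx).1, (ih3 x hx).2.1, by simp [(ih3 x hx).2.2]⟩⟩

-- one step of a level is the neighbor fold (definitional)
theorem bfsLevel_cons (g : PySem.Dict String (List String)) (obstacles : List String) (st : PySem.Set String × List String) (node : String) (rest : List String) :
    bfsLevel g obstacles st (node :: rest)
      = bfsLevel g obstacles ((PySem.Dict.getD g node []).foldl (visitStep obstacles) st) rest := rfl

-- accumulator lemma for a whole level
theorem bfsLevel_acc (g : PySem.Dict String (List String)) (obstacles : List String) (front : List String) (st : PySem.Set String × List String) :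
    bfsLevel g obstacles st front
      = ((bfsLevel g obstacles (st.1, []) front).1, st.2 ++ (bfsLevel g obstacles (st.1, []) front).2) := by
  induction front generalizing st with
  | nil => simp [bfsLevel]
  | cons node rest ih =>
    rw [bfsLevel_cons, bfsLevel_cons, foldl_visitStep_acc obstacles _ st]
    rw [ih (((PySem.Dict.getD g node []).foldl (visitStep obstacles) (st.1, [])).1,
            st.2 ++ ((PySem.Dict.getD g node []).foldl (visitStep obstacles) (st.1, [])).2),
        ih ((PySem.Dict.getD g node []).foldl (visitStep obstacles) (st.1, []))]
    simp

-- what one level produces (new nodes come from SOME frontier node's adjacency list)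
theorem bfsLevel_props (g : PySem.Dict String (List String)) (obstacles : List String) (front : List String) (v : PySem.Set String) :
    (bfsLevel g obstacles (v, []) front).1 = v ++ (bfsLevel g obstacles (v, []) front).2 ∧
    (bfsLevel g obstacles (v, []) front).2.Nodup ∧
    ∀ x ∈ (bfsLevel g obstacles (v, []) front).2, x ∉ v ∧ obstacles.contains x = false ∧ ∃ node ∈ front, x ∈ PySem.Dict.getD g node [] := by
  induction front generalizing v with
  | nil => simp [bfsLevel]
  | cons node rest ih =>
    obtain ⟨u1, u2, u3⟩ := foldl_visitStep_props obstacles (PySem.Dict.getD g node []) v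
    rw [bfsLevel_cons, bfsLevel_acc g obstacles rest ((PySem.Dict.getD g node []).foldl (visitStep obstacles) (v, []))]
    obtain ⟨L1, L2, L3⟩ := ih ((PySem.Dict.getD g node []).foldl (visitStep obstacles) (v, [])).1
    refine ⟨?_, ?_, ?_⟩
    · rw [L1, u1]; simp
    · rw [List.nodup_append]
      refine ⟨u2, L2, ?_⟩
      intro x hxu y hyL hxy
      exact (L3 y hyL).1 (by rw [u1]; simp [hxy ▸ hxu])
    · intro x hx
      rcases List.mem_append.1 hx with hxu | hxL
      · exact ⟨(u3 x hxu).1, (u3 x hxu).2.1, node, by simp, (u3 x hxu).2.2⟩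
      · obtain ⟨l1, l2, nd, hnd, l3⟩ := L3 x hxL
        rw [u1] at l1
        exact ⟨fun hm => l1 (by simp [hm]), l2, nd, by simp [hnd], l3⟩

-- number of graph keys not yet visited
def unvis (g : PySem.Dict String (List String)) (v : PySem.Set String) : Nat :=
  ((PySem.Dict.keys g).toFinset \ v.toFinset).card

theorem unvis_append (g : PySem.Dict String (List String)) (v : PySem.Set String) (news : List String)
    (hnd : news.Nodup) (hnew : ∀ x ∈ news, x ∉ v ∧ PySem.Dict.contains g x = true) :
    unvis g (v ++ news) + news.length ≤ unvis g v := by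
  classical
  have hsub : news.toFinset ⊆ (PySem.Dict.keys g).toFinset \ v.toFinset := by
    intro x hx
    rw [List.mem_toFinset] at hx
    obtain ⟨h1, h2⟩ := hnew x hx
    rw [Finset.mem_sdiff, List.mem_toFinset, List.mem_toFinset]
    exact ⟨(PySem.Dict.contains_iff_mem_keys g x).1 h2, h1⟩
  have h4 : (PySem.Dict.keys g).toFinset \ ((v.toFinset) ∪ news.toFinset)
      = (((PySem.Dict.keys g).toFinset \ v.toFinset)) \ news.toFinset := by
    ext x; simp only [Finset.mem_sdiff, Finset.mem_union]; tauto
  have h1 : ((((PySem.Dict.keys g).toFinset \ v.toFinset)) \ news.toFinset).card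
      = (((PySem.Dict.keys g).toFinset \ v.toFinset)).card - news.toFinset.card := by
    rw [Finset.card_sdiff, Finset.inter_eq_left.mpr hsub]
  have h2 : news.toFinset.card = news.length := List.toFinset_card_of_nodup hnd
  have h3 := Finset.card_le_card hsub
  unfold unvis
  rw [List.toFinset_append, h4, h1, h2]
  omega

-- A's queue loop, run through one whole frontier, is B's level step
theorem bfsLoopA_level (g : PySem.Dict String (List String)) (obstacles : List String) (front pending : List String) (v : PySem.Set String) (fuel : Nat) :
    bfsLoopA g obstacles (front.length + fuel) v (front ++ pending)
      = bfsLoopA g obstacles fuel (bfsLevel g obstacles (v, []) front).1 (pending ++ (bfsLevel g obstacles (v, []) front).2) := by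
  induction front generalizing v pending with
  | nil => simp [bfsLevel]
  | cons node rest ih =>
    rw [show (node :: rest).length + fuel = (rest.length + fuel) + 1 from by simp; omega]
    rw [show (node :: rest) ++ pending = node :: (rest ++ pending) from rfl]
    rw [show bfsLoopA g obstacles ((rest.length + fuel) + 1) v (node :: (rest ++ pending))
      = bfsLoopA g obstacles (rest.length + fuel)
          ((PySem.Dict.getD g node []).foldl (visitStep obstacles) (v, rest ++ pending)).1
          ((PySem.Dict.getD g node []).foldl (visitStep obstacles) (v, rest ++ pending)).2 from rfl]
    rw [foldl_visitStep_acc obstacles _ (v, rest ++ pending)]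
    dsimp only
    rw [show ((rest ++ pending) ++ ((PySem.Dict.getD g node []).foldl (visitStep obstacles) (v, [])).2)
      = rest ++ (pending ++ ((PySem.Dict.getD g node []).foldl (visitStep obstacles) (v, [])).2) from by simp]
    rw [ih _ _]
    rw [bfsLevel_cons, bfsLevel_acc g obstacles rest ((PySem.Dict.getD g node []).foldl (visitStep obstacles) (v, []))]
    simp

-- the two loops agree whenever the frontier stays inside a step-closed set R of keys
theorem loopA_eq_loopB (g : PySem.Dict String (List String)) (obstacles : List String)
    (R : List String)
    (hclosed : ∀ k ∈ R, ∀ x ∈ PySem.Dict.getD g k [], obstacles.contains x = false → x ∈ R)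
    (hkeys : ∀ x ∈ R, PySem.Dict.contains g x = true) :
    ∀ (c : Nat) (v : PySem.Set String) (front : List String) (fA fB : Nat),
      (∀ x ∈ front, x ∈ R) →
      unvis g v ≤ c → unvis g v + front.length ≤ fA → c + 2 ≤ fB →
      bfsLoopA g obstacles fA v front = bfsLoopB g obstacles fB v front := by
  intro c
  induction c with
  | zero =>
    intro v front fA fB hfront hc hfA hfB
    cases front with
    | nil => cases fA <;> cases fB <;> rfl
    | cons node fr =>
      obtain ⟨m, rfl⟩ : ∃ m, fB = m + 1 := ⟨fB - 1, by omega⟩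
      obtain ⟨f, rfl⟩ : ∃ f, fA = (node :: fr).length + f :=
        ⟨fA - (node :: fr).length, by simp at hfA ⊢; omega⟩
      have hA := bfsLoopA_level g obstacles (node :: fr) [] v f
      rw [List.append_nil, List.nil_append] at hA
      rw [hA, show bfsLoopB g obstacles (m + 1) v (node :: fr)
        = bfsLoopB g obstacles m (bfsLevel g obstacles (v, []) (node :: fr)).1
            (bfsLevel g obstacles (v, []) (node :: fr)).2 from rfl]
      obtain ⟨p1, p2, p3⟩ := bfsLevel_props g obstacles (node :: fr) v
      rcases hr2 : (bfsLevel g obstacles (v, []) (node :: fr)).2 with _ | ⟨x, xs⟩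
      · cases f <;> cases m <;> rfl
      · exfalso
        have hmeas := unvis_append g v (bfsLevel g obstacles (v, []) (node :: fr)).2 p2
          (fun x hx => by
            obtain ⟨h1, h2, nd, hndf, h3⟩ := p3 x hx
            exact ⟨h1, hkeys x (hclosed nd (hfront nd hndf) x h3 h2)⟩)
        rw [← p1, hr2] at hmeas
        simp at hmeas
        omega
  | succ c ih =>
    intro v front fA fB hfront hc hfA hfB
    cases front with
    | nil => cases fA <;> cases fB <;> rfl
    | cons node fr =>
      obtain ⟨m, rfl⟩ : ∃ m, fB = m + 1 := ⟨fB - 1, by omega⟩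
      obtain ⟨f, rfl⟩ : ∃ f, fA = (node :: fr).length + f :=
        ⟨fA - (node :: fr).length, by simp at hfA ⊢; omega⟩
      have hA := bfsLoopA_level g obstacles (node :: fr) [] v f
      rw [List.append_nil, List.nil_append] at hA
      rw [hA, show bfsLoopB g obstacles (m + 1) v (node :: fr)
        = bfsLoopB g obstacles m (bfsLevel g obstacles (v, []) (node :: fr)).1
            (bfsLevel g obstacles (v, []) (node :: fr)).2 from rfl]
      obtain ⟨p1, p2, p3⟩ := bfsLevel_props g obstacles (node :: fr) v
      rcases hr2 : (bfsLevel g obstacles (v, []) (node :: fr)).2 with _ | ⟨x, xs⟩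
      · cases f <;> cases m <;> rfl
      · have hRnews : ∀ x ∈ (bfsLevel g obstacles (v, []) (node :: fr)).2, x ∈ R :=
          fun x hx => by
            obtain ⟨h1, h2, nd, hndf, h3⟩ := p3 x hx
            exact hclosed nd (hfront nd hndf) x h3 h2
        have hmeas := unvis_append g v (bfsLevel g obstacles (v, []) (node :: fr)).2 p2
          (fun x hx => ⟨(p3 x hx).1, hkeys x (hRnews x hx)⟩)
        rw [← p1] at hmeas
        have h5 : (bfsLevel g obstacles (v, []) (node :: fr)).2.length = (x :: xs).length :=
          congrArg List.length hr2
        have h6 : (1 : Nat) ≤ (x :: xs).length := by simp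
        exact ih _ _ f m (hr2 ▸ hRnews) (by omega) (by omega) (by omega)

theorem keys_ofList_le (graph : List (String × List String)) :
    (PySem.Dict.keys (PySem.Dict.ofList graph)).length ≤ graph.length := by
  have h : PySem.Dict.ofList graph
      = graph.foldl (fun d p => d.insert p.1 p.2) (PySem.Dict.empty : PySem.Dict String (List String)) := rfl
  rw [h, PySem.Dict.keys_foldl_insert_key graph Prod.fst (fun _ p => p.2) PySem.Dict.empty]
  rw [PySem.Dict.keys_empty, PySem.Set.update_nil_left]
  calc (PySem.Set.ofList (graph.map Prod.fst)).length
      ≤ (graph.map Prod.fst).length := PySem.Set.length_ofList_le _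
    _ = graph.length := List.length_map ..

-- ===== VERDICT (by name: the statement is the Claim_ definition above) =====
theorem bfs_spec : Claim_equal_bfs := by
  intro graph start obstacles _ hpre
  show bfsLoopA (PySem.Dict.ofList graph) obstacles (graph.length + 1) (PySem.Set.add PySem.Set.empty start) [start]
     = bfsLoopB (PySem.Dict.ofList graph) obstacles (graph.length + 2) (PySem.Set.add PySem.Set.empty start) [start]
  have hk : unvis (PySem.Dict.ofList graph) (PySem.Set.add PySem.Set.empty start) ≤ graph.length := by
    calc unvis (PySem.Dict.ofList graph) (PySem.Set.add PySem.Set.empty start)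
        ≤ (PySem.Dict.keys (PySem.Dict.ofList graph)).toFinset.card :=
          Finset.card_le_card (Finset.sdiff_subset)
      _ ≤ (PySem.Dict.keys (PySem.Dict.ofList graph)).length := List.toFinset_card_le _
      _ ≤ graph.length := keys_ofList_le graph
  exact loopA_eq_loopB (PySem.Dict.ofList graph) obstacles (reachSet graph start obstacles)
    (fun k hk x hx hobs => reachSet_closed graph start obstacles k x hk hx hobs)
    (fun x hx => hpre x hx)
    (unvis (PySem.Dict.ofList graph) (PySem.Set.add PySem.Set.empty start))
    (PySem.Set.add PySem.Set.empty start) [start]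
    (graph.length + 1) (graph.length + 2)
    (fun x hx => by
      rw [List.mem_singleton] at hx
      rw [hx]
      exact start_mem_reachSet graph start obstacles)
    le_rfl (by simp only [List.length_cons, List.length_nil]; omega) (by omega)
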